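-- pv_equiv track=rewrite | github.com/alokumarjaiswal/gmaps_scraper | utils/helpers.py | calculate_media_statistics
-- ===== SOURCE A (Python) =====
-- from typing import Optional, List, Dict, Any
--
-- def calculate_media_statistics(media_data: Dict[str, List[str]]) -> Dict[str, Any]:
--     """
--     Calculate statistics for extracted media data.
--
--     Args:
--         media_data: Dictionary mapping categories to URL lists
--
--     Returns:
--         dict: Media statistics
--     """
--     total_items = sum(len(urls) for urls in media_data.values())
--     all_urls = [url for urls in media_data.values() for url in urls]
--     unique_urls = list(set(all_urls))
--     duplicates_removed = len(all_urls) - len(unique_urls)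
--
--     return {
--         "total_categories": len(media_data),
--         "total_media_items": total_items,
--         "unique_media_items": len(unique_urls),
--         "duplicates_found": duplicates_removed
--     }
-- ===== SOURCE B (Python) =====
-- def calculate_media_statistics(media_data):
--     all_urls = []
--     for urls in media_data.values():
--         all_urls.extend(urls)
--     all_urls.sort()
--     unique = 0
--     prev = None
--     for url in all_urls:
--         if url != prev:
--             unique += 1
--         prev = url
--     total = len(all_urls)
--     return {
--         "total_categories": len(media_data),
--         "total_media_items": total,
--         "unique_media_items": unique,
--         "duplicates_found": total - unique
--     }
-- ===== Notes on version B (the rewrite author's own statement) =====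
-- stated objective: alternative
-- what changed: Replaces A's hash-set based distinct counting (flatten, build a set, compare lengths) with a sort-then-scan algorithm: flatten once, sort the urls, and count unique items by comparing each element with its predecessor in a single linear scan.
import Mathlib
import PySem

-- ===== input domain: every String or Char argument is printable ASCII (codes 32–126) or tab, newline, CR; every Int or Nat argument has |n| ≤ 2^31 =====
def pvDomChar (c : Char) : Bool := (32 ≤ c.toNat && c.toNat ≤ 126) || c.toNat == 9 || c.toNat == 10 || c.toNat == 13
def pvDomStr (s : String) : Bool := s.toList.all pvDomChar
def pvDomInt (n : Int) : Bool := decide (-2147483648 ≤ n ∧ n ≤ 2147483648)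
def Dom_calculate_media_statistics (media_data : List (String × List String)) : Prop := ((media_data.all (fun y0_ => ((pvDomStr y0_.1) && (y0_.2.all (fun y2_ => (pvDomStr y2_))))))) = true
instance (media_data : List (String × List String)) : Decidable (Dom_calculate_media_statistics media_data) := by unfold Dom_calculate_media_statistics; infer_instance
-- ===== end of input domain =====

-- B replaces A's set-based distinct count with sort-then-scan (count adjacent changes); same return value, alternative algorithm.

-- ===== PORT A =====
def calculate_media_statistics (media_data : List (String × List String)) : List (String × Int) :=
  let total_items : Int := (media_data.map (fun p => (p.2.length : Int))).sum
  let all_urls : List String := (media_data.map (fun p => p.2)).flatMap (fun urls => urls)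
  let unique_urls : List String := PySem.Set.ofList all_urls
  let duplicates_removed : Int := (all_urls.length : Int) - (unique_urls.length : Int)
  [("total_categories", (media_data.length : Int)),
   ("total_media_items", total_items),
   ("unique_media_items", (unique_urls.length : Int)),
   ("duplicates_found", duplicates_removed)]

-- ===== PORT B =====
def calculate_media_statistics_alt (media_data : List (String × List String)) : List (String × Int) :=
  let all_urls : List String := media_data.foldl (fun acc p => acc ++ p.2) []
  let sorted_urls : List String := PySem.List.sorted all_urls (fun x => x) false
  -- scan: running pair (unique, prev); 'if url != prev: unique += 1; prev = url'
  let scan := sorted_urls.foldl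
    (fun (a : Int × Option String) url => (if some url = a.2 then a.1 else a.1 + 1, some url))
    (0, (none : Option String))
  let unique : Int := scan.1
  let total : Int := (sorted_urls.length : Int)
  [("total_categories", (media_data.length : Int)),
   ("total_media_items", total),
   ("unique_media_items", unique),
   ("duplicates_found", total - unique)]

-- ===== PRECONDITION & SPEC =====
def Spec_calculate_media_statistics (media_data : List (String × List String)) (out : List (String × Int)) : Prop := out = calculate_media_statistics_alt media_data
instance (media_data : List (String × List String)) (out : List (String × Int)) : Decidable (Spec_calculate_media_statistics media_data out) := by unfold Spec_calculate_media_statistics; infer_instance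

-- ===== CLAIM =====
def Claim_equal_calculate_media_statistics : Prop := ∀ (media_data : List (String × List String)), Dom_calculate_media_statistics media_data → Spec_calculate_media_statistics media_data (calculate_media_statistics media_data)

-- ===== LEMMAS AND PROOFS =====

-- The step of B's scan loop (eta-equal to the lambda in the port).
def pvStep (a : Int × Option String) (url : String) : Int × Option String :=
  (if some url = a.2 then a.1 else a.1 + 1, some url)

-- Scanning a sorted tail after element x counts exactly the new distinct elements.
theorem pv_scan_sorted (m : List String) : ∀ (x : String) (u : Int),
    (x :: m).Pairwise (· ≤ ·) →
    m.foldl pvStep (u, some x) = (u + ((x :: m).dedup.length : Int) - 1, some (m.getLastD x)) := by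
  induction m with
  | nil => intro x u _; simp [List.dedup]
  | cons y ys ih =>
      intro x u h
      have hxle : ∀ z ∈ y :: ys, x ≤ z := fun z hz => List.rel_of_pairwise_cons h hz
      have htail : (y :: ys).Pairwise (· ≤ ·) := h.of_cons
      have hstep : ys.foldl pvStep (pvStep (u, some x) y)
          = ys.foldl pvStep ((if y = x then u else u + 1), some y) := by
        simp [pvStep]
      rw [List.foldl_cons, hstep, ih y _ htail, List.getLastD_cons]
      by_cases hxy : y = x
      · subst hxy
        rw [List.dedup_cons_of_mem (List.mem_cons_self)]
        simp
      · have hxnot : x ∉ y :: ys := by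
          intro hx
          rcases List.mem_cons.mp hx with h1 | h2
          · exact hxy h1.symm
          · have h3 : y ≤ x := List.rel_of_pairwise_cons htail h2
            have h4 : x ≤ y := hxle y List.mem_cons_self
            exact hxy (le_antisymm h3 h4)
        rw [List.dedup_cons_of_notMem hxnot]
        simp [hxy]
        ring

-- B's scan over a sorted list returns the number of distinct elements.
theorem pv_scan_top (m : List String) (h : m.Pairwise (· ≤ ·)) :
    (m.foldl pvStep (0, (none : Option String))).1 = (m.dedup.length : Int) := by
  cases m with
  | nil => simp
  | cons x xs =>
      have hstep : pvStep (0, (none : Option String)) x = (1, some x) := by simp [pvStep]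
      rw [List.foldl_cons, hstep, pv_scan_sorted xs x 1 h]
      push_cast
      ring

-- The number of distinct elements of a list equals the length of Mathlib's dedup.
theorem pv_ofList_length (l : List String) :
    (PySem.Set.ofList l).length = l.dedup.length := by
  have h1 := List.toFinset_card_of_nodup (PySem.Set.nodup_ofList l)
  have h2 := List.toFinset_card_of_nodup (List.nodup_dedup l)
  have h3 : (PySem.Set.ofList l).toFinset = l.dedup.toFinset := by
    ext z; simp [List.mem_toFinset, PySem.Set.mem_ofList, List.mem_dedup]
  rw [← h1, ← h2, h3]

-- ===== VERDICT =====
theorem calculate_media_statistics_spec : Claim_equal_calculate_media_statistics := by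
  intro md _
  unfold Spec_calculate_media_statistics calculate_media_statistics calculate_media_statistics_alt
  have hflat : md.foldl (fun acc p => acc ++ p.2) [] = (md.map (fun p => p.2)).flatMap (fun urls => urls) := by
    simp
  set all := (md.map (fun p => p.2)).flatMap (fun urls => urls) with hall
  have hsortlen : (PySem.List.sorted all (fun x => x) false).length = all.length :=
    PySem.List.length_sorted all (fun x => x) false
  have htot : ((md.map (fun p => (p.2.length : Int))).sum) = (all.length : Int) := by
    simp [hall, Function.comp_def]
  have hpw : (PySem.List.sorted all (fun x => x) false).Pairwise (· ≤ ·) := by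
    simpa using PySem.List.sorted_pairwise all (fun x => x)
  have hperm : (PySem.List.sorted all (fun x => x) false).Perm all :=
    PySem.List.sorted_perm all (fun x => x) false
  have huniq : ((PySem.List.sorted all (fun x => x) false).foldl pvStep (0, (none : Option String))).1
      = ((PySem.Set.ofList all).length : Int) := by
    rw [pv_scan_top _ hpw, pv_ofList_length, (hperm.dedup).length_eq]
  simp only [hflat]
  rw [show (fun (a : Int × Option String) url => (if some url = a.2 then a.1 else a.1 + 1, some url)) = pvStep from rfl]
  rw [huniq, hsortlen, htot]
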